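-- pv_equiv track=rewrite | github.com/YanaAnisimova/goit-python | module_7/hw7_5.py | capital_text
-- ===== SOURCE A (Python) =====
-- def capital_text(s):
--
--     new_string = []
--     for i in s.split('.'):
--         string_2 = []
--         for j in i.split('!'):
--             string_3 = []
--             for k in j.split('?'):
--                 string_3.append(k.strip().capitalize())
--             string_2.append('? '.join(string_3))
--         new_string.append('! '.join(string_2))
--
--     return '. '.join(new_string)
-- ===== SOURCE B (Python) =====
-- def capital_text(s):
--     out = []
--     cur = []
--     for ch in s:
--         if ch in '.!?':
--             out.append(''.join(cur).strip().capitalize())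
--             out.append(ch)
--             out.append(' ')
--             cur = []
--         else:
--             cur.append(ch)
--     out.append(''.join(cur).strip().capitalize())
--     return ''.join(out)
-- ===== Notes on version B (the rewrite author's own statement) =====
-- stated objective: alternative
-- what changed: Replaces A's three nested split/map/join passes (on the three sentence delimiters in turn) by a single left-to-right scan over the characters that emits each stripped and capitalized segment, then the delimiter and a space, as soon as a delimiter is met.
import Mathlib
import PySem

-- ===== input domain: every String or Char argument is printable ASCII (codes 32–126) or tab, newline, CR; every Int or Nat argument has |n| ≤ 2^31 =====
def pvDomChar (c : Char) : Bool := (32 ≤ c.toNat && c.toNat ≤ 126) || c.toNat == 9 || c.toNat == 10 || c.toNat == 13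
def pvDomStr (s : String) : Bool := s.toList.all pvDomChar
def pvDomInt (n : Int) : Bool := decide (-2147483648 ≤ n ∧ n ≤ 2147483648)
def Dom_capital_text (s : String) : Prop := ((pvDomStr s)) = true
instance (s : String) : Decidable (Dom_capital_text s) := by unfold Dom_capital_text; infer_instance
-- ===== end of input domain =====

-- B replaces A's three nested split/join passes by a single left-to-right scan over the
-- characters that emits each stripped+capitalized segment as soon as a delimiter is met
-- (objective: alternative one-pass algorithm, same result).


-- ===== PORT A =====
-- k.strip().capitalize() — capitalize ported by hand (no PySem primitive): first char
-- uppercased, the rest lowered; exact on the ASCII domain.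
def pvCapStrip (k : List Char) : List Char :=
  match PySem.Chars.strip k with
  | [] => []
  | c :: rest => PySem.Chars.upperChar c :: PySem.Chars.lower rest

-- the innermost loop: '? '.join(k.strip().capitalize() for k in j.split('?'))
def pvInnerQ (j : List Char) : List Char :=
  PySem.Chars.join ['?', ' '] ((PySem.Chars.splitOn j ['?']).map pvCapStrip)

-- the middle loop: '! '.join(... for j in i.split('!'))
def pvInnerB (i : List Char) : List Char :=
  PySem.Chars.join ['!', ' '] ((PySem.Chars.splitOn i ['!']).map pvInnerQ)

-- the outer loop: '. '.join(... for i in s.split('.'))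
def capital_text (s : String) : String :=
  String.ofList (PySem.Chars.join ['.', ' '] ((PySem.Chars.splitOn s.toList ['.']).map pvInnerB))

-- ===== PORT B =====
def pvDelim (c : Char) : Bool := c == '.' || c == '!' || c == '?'   -- ch in '.!?'

-- one step of B's loop; state = (out, cur), both as character lists
def pvStep (p : List Char × List Char) (c : Char) : List Char × List Char :=
  if pvDelim c then (p.1 ++ pvCapStrip p.2 ++ [c, ' '], []) else (p.1, p.2 ++ [c])

def capital_text_alt (s : String) : String :=
  let st := s.toList.foldl pvStep ([], [])
  String.ofList (st.1 ++ pvCapStrip st.2)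

-- ===== PRECONDITION & SPEC =====
def Spec_capital_text (s : String) (out : String) : Prop := out = capital_text_alt s
instance (s : String) (out : String) : Decidable (Spec_capital_text s out) := by unfold Spec_capital_text; infer_instance

-- ===== CLAIM (what is proved, stated in full; the proofs are below) =====
def Claim_equal_capital_text : Prop := ∀ (s : String), Dom_capital_text s → Spec_capital_text s (capital_text s)

-- ===== LEMMAS AND PROOFS =====

-- simple structural recursion equivalent to PySem's fuelled splitOn for a 1-char separator
def mySplit (d : Char) : List Char → List (List Char)
  | [] => [[]]
  | c :: cs => if c = d then [] :: mySplit d cs else (mySplit d cs).modifyHead (c :: ·)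

theorem mySplit_ne_nil (d : Char) (cs : List Char) : mySplit d cs ≠ [] := by
  cases cs with
  | nil => simp [mySplit]
  | cons c cs =>
    have := mySplit_ne_nil d cs
    simp only [mySplit]
    split
    · simp
    · cases h : mySplit d cs with
      | nil => exact absurd h this
      | cons a l => simp [List.modifyHead]

theorem splitOn_go_eq (d : Char) :
    ∀ (fuel : Nat) (l cur : List Char) (acc : List (List Char)), l.length < fuel →
      PySem.Chars.splitOn.go [d] fuel l cur acc
        = acc.reverse ++ (mySplit d l).modifyHead (cur.reverse ++ ·) := by
  intro fuel
  induction fuel with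
  | zero => intro l cur acc hl; omega
  | succ f ih =>
    intro l cur acc hl
    cases l with
    | nil =>
      rw [PySem.Chars.splitOn.go]
      · simp [mySplit, List.modifyHead]
      · omega
    | cons c rest =>
      rw [PySem.Chars.splitOn.go]
      have hpre : ([d].isPrefixOf (c :: rest)) = (d == c) := by simp [List.isPrefixOf]
      rw [hpre]
      by_cases hcd : c = d
      · subst hcd
        simp only [BEq.rfl, if_true, List.length_cons, List.drop_succ_cons, List.length_nil,
          List.drop_zero]
        rw [ih rest [] (cur.reverse :: acc) (by simpa using hl)]
        cases hm : mySplit c rest with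
        | nil => exact absurd hm (mySplit_ne_nil c rest)
        | cons a l' => simp [mySplit, hm, List.modifyHead]
      · have : (d == c) = false := beq_eq_false_iff_ne.mpr (fun h => hcd h.symm)
        rw [this]
        simp only [Bool.false_eq_true, if_false]
        rw [ih rest (c :: cur) acc (by simpa using hl)]
        cases hm : mySplit d rest with
        | nil => exact absurd hm (mySplit_ne_nil d rest)
        | cons a l' => simp [mySplit, hm, hcd, List.modifyHead]

theorem splitOn_eq_mySplit (cs : List Char) (d : Char) :
    PySem.Chars.splitOn cs [d] = mySplit d cs := by
  rw [PySem.Chars.splitOn, splitOn_go_eq d (cs.length + 1) cs [] [] (by omega)]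
  cases hm : mySplit d cs with
  | nil => exact absurd hm (mySplit_ne_nil d cs)
  | cons a l' => simp [List.modifyHead]

-- B's recursion, written directly as a function of (current segment, remaining input)
def pvGaux : List Char → List Char → List Char
  | cur, [] => pvCapStrip cur
  | cur, c :: rest =>
    if pvDelim c then pvCapStrip cur ++ [c, ' '] ++ pvGaux [] rest
    else pvGaux (cur ++ [c]) rest

theorem foldl_eq_gaux (l : List Char) : ∀ (out cur : List Char),
    (l.foldl pvStep (out, cur)).1 ++ pvCapStrip (l.foldl pvStep (out, cur)).2
      = out ++ pvGaux cur l := by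
  induction l with
  | nil => intro out cur; simp [pvGaux]
  | cons c rest ih =>
    intro out cur
    by_cases hc : pvDelim c = true
    · simp only [List.foldl_cons, pvStep, hc, pvGaux]
      rw [ih]
      simp
    · simp only [List.foldl_cons, pvStep, pvGaux, if_neg hc]
      rw [ih]

theorem gaux_nodelim (l : List Char) : ∀ cur, (∀ c ∈ l, pvDelim c = false) →
    pvGaux cur l = pvCapStrip (cur ++ l) := by
  induction l with
  | nil => intro cur _; simp [pvGaux]
  | cons c rest ih =>
    intro cur h
    have hc : pvDelim c = false := h c (List.mem_cons_self)
    simp only [pvGaux, hc, Bool.false_eq_true, if_false]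
    rw [ih (cur ++ [c]) (fun x hx => h x (List.mem_cons_of_mem _ hx))]
    simp

theorem gaux_split (pre : List Char) (d : Char) (rest : List Char) :
    ∀ cur, (∀ c ∈ pre, pvDelim c = false) → pvDelim d = true →
    pvGaux cur (pre ++ d :: rest) = pvCapStrip (cur ++ pre) ++ [d, ' '] ++ pvGaux [] rest := by
  induction pre with
  | nil => intro cur _ hd; simp [pvGaux, hd]
  | cons c pre ih =>
    intro cur h hd
    have hc : pvDelim c = false := h c (List.mem_cons_self)
    simp only [List.cons_append, pvGaux, hc, Bool.false_eq_true, if_false]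
    rw [ih (cur ++ [c]) (fun x hx => h x (List.mem_cons_of_mem _ hx)) hd]
    simp

-- generic facts about 'join sep (map g (mySplit d cs))'
theorem mySplit_append_free (d : Char) (pre cs : List Char) (h : ∀ c ∈ pre, c ≠ d) :
    mySplit d (pre ++ cs) = (mySplit d cs).modifyHead (pre ++ ·) := by
  induction pre with
  | nil =>
    cases hcs : mySplit d cs with
    | nil => exact absurd hcs (mySplit_ne_nil d cs)
    | cons a l => simp [hcs, List.modifyHead]
  | cons c pre ih =>
    have hc : c ≠ d := h c (List.mem_cons_self)
    simp only [List.cons_append, mySplit, if_neg hc]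
    rw [ih (fun x hx => h x (List.mem_cons_of_mem _ hx))]
    cases hcs : mySplit d cs with
    | nil => exact absurd hcs (mySplit_ne_nil d cs)
    | cons a l => simp [List.modifyHead]

theorem mySplit_eq_single (d : Char) (cs : List Char) (h : ∀ c ∈ cs, c ≠ d) :
    mySplit d cs = [cs] := by
  have := mySplit_append_free d cs [] h
  simpa [mySplit, List.modifyHead] using this

theorem split_join_pure {g : List Char → List Char} {sep : List Char} (d : Char)
    (cs : List Char) (h : ∀ c ∈ cs, c ≠ d) :
    PySem.Chars.join sep ((mySplit d cs).map g) = g cs := by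
  rw [mySplit_eq_single d cs h]
  simp [PySem.Chars.join_singleton]

theorem mySplit_split_at (d : Char) (pre rest : List Char) (h : ∀ c ∈ pre, c ≠ d) :
    mySplit d (pre ++ d :: rest) = pre :: mySplit d rest := by
  rw [mySplit_append_free d pre (d :: rest) h]
  simp [mySplit, List.modifyHead]

theorem split_join_at {g : List Char → List Char} {sep : List Char} (d : Char)
    (pre rest : List Char) (h : ∀ c ∈ pre, c ≠ d) :
    PySem.Chars.join sep ((mySplit d (pre ++ d :: rest)).map g)
      = g pre ++ sep ++ PySem.Chars.join sep ((mySplit d rest).map g) := by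
  rw [mySplit_split_at d pre rest h]
  cases hm : mySplit d rest with
  | nil => exact absurd hm (mySplit_ne_nil d rest)
  | cons a l' => simp [PySem.Chars.join_cons_cons, List.append_assoc]

theorem split_join_headmod {g : List Char → List Char} {sep : List Char} (d : Char)
    (pre cs X : List Char) (h : ∀ c ∈ pre, c ≠ d)
    (hg : ∀ hd, g (pre ++ hd) = X ++ g hd) :
    PySem.Chars.join sep ((mySplit d (pre ++ cs)).map g)
      = X ++ PySem.Chars.join sep ((mySplit d cs).map g) := by
  rw [mySplit_append_free d pre cs h]
  cases hm : mySplit d cs with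
  | nil => exact absurd hm (mySplit_ne_nil d cs)
  | cons a l' =>
    cases l' with
    | nil => simp [List.modifyHead, PySem.Chars.join_singleton, hg]
    | cons b l'' =>
      simp [List.modifyHead, PySem.Chars.join_cons_cons, hg, List.append_assoc]

-- A's three levels, rewritten through mySplit
def pvA1 (cs : List Char) : List Char :=
  PySem.Chars.join ['.', ' '] ((mySplit '.' cs).map pvInnerB)

theorem pvInnerQ_eq (j : List Char) :
    pvInnerQ j = PySem.Chars.join ['?', ' '] ((mySplit '?' j).map pvCapStrip) := by
  simp [pvInnerQ, splitOn_eq_mySplit]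

theorem pvInnerB_eq (i : List Char) :
    pvInnerB i = PySem.Chars.join ['!', ' '] ((mySplit '!' i).map pvInnerQ) := by
  simp [pvInnerB, splitOn_eq_mySplit]

theorem pvDelim_false_ne {c : Char} (h : pvDelim c = false) :
    c ≠ '.' ∧ c ≠ '!' ∧ c ≠ '?' := by
  simp [pvDelim] at h
  exact ⟨h.1.1, h.1.2, h.2⟩

theorem pvInnerQ_pure (cs : List Char) (h : ∀ c ∈ cs, pvDelim c = false) :
    pvInnerQ cs = pvCapStrip cs := by
  rw [pvInnerQ_eq, split_join_pure '?' cs (fun c hc => (pvDelim_false_ne (h c hc)).2.2)]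

theorem pvInnerB_pure (cs : List Char) (h : ∀ c ∈ cs, pvDelim c = false) :
    pvInnerB cs = pvCapStrip cs := by
  rw [pvInnerB_eq, split_join_pure '!' cs (fun c hc => (pvDelim_false_ne (h c hc)).2.1)]
  exact pvInnerQ_pure cs h

theorem pvA1_pure (cs : List Char) (h : ∀ c ∈ cs, pvDelim c = false) :
    pvA1 cs = pvCapStrip cs := by
  rw [pvA1, split_join_pure '.' cs (fun c hc => (pvDelim_false_ne (h c hc)).1)]
  exact pvInnerB_pure cs h

theorem pvInnerQ_first (pre : List Char) (rest : List Char)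
    (h : ∀ c ∈ pre, pvDelim c = false) :
    pvInnerQ (pre ++ '?' :: rest) = pvCapStrip pre ++ ['?', ' '] ++ pvInnerQ rest := by
  rw [pvInnerQ_eq, split_join_at '?' pre rest (fun c hc => (pvDelim_false_ne (h c hc)).2.2),
    ← pvInnerQ_eq]

theorem pvInnerB_first_q (pre : List Char) (rest : List Char)
    (h : ∀ c ∈ pre, pvDelim c = false) :
    pvInnerB (pre ++ '?' :: rest) = pvCapStrip pre ++ ['?', ' '] ++ pvInnerB rest := by
  rw [pvInnerB_eq, show pre ++ '?' :: rest = (pre ++ ['?']) ++ rest by simp,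
    split_join_headmod '!' (pre ++ ['?']) rest (pvCapStrip pre ++ ['?', ' '])
      (by intro c hc
          rcases List.mem_append.mp hc with hc | hc
          · exact (pvDelim_false_ne (h c hc)).2.1
          · simp at hc; subst hc; decide)
      (by intro hd2
          rw [show (pre ++ ['?']) ++ hd2 = pre ++ '?' :: hd2 by simp]
          exact pvInnerQ_first pre hd2 h),
    ← pvInnerB_eq]

theorem pvA1_first (pre : List Char) (d : Char) (rest : List Char)
    (h : ∀ c ∈ pre, pvDelim c = false) (hd : pvDelim d = true) :
    pvA1 (pre ++ d :: rest) = pvCapStrip pre ++ [d, ' '] ++ pvA1 rest := by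
  have hd' : d = '.' ∨ d = '!' ∨ d = '?' := by simp [pvDelim] at hd; tauto
  have hfreeD : ∀ c ∈ pre, c ≠ '.' := fun c hc => (pvDelim_false_ne (h c hc)).1
  rcases hd' with h1 | h1 | h1
  · subst h1
    rw [pvA1, split_join_at '.' pre rest hfreeD, ← pvA1, pvInnerB_pure pre h]
  all_goals
    subst h1
  · rw [pvA1, show pre ++ '!' :: rest = (pre ++ ['!']) ++ rest by simp,
      split_join_headmod '.' (pre ++ ['!']) rest (pvCapStrip pre ++ ['!', ' '])
        (by intro c hc
            rcases List.mem_append.mp hc with hc | hc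
            · exact hfreeD c hc
            · simp at hc; subst hc; decide)
        (by intro hd2
            rw [show (pre ++ ['!']) ++ hd2 = pre ++ '!' :: hd2 by simp]
            rw [pvInnerB_eq, split_join_at '!' pre hd2
              (fun c hc => (pvDelim_false_ne (h c hc)).2.1), ← pvInnerB_eq,
              pvInnerQ_pure pre h]),
      ← pvA1]
  · rw [pvA1, show pre ++ '?' :: rest = (pre ++ ['?']) ++ rest by simp,
      split_join_headmod '.' (pre ++ ['?']) rest (pvCapStrip pre ++ ['?', ' '])
        (by intro c hc
            rcases List.mem_append.mp hc with hc | hc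
            · exact hfreeD c hc
            · simp at hc; subst hc; decide)
        (by intro hd2
            rw [show (pre ++ ['?']) ++ hd2 = pre ++ '?' :: hd2 by simp]
            exact pvInnerB_first_q pre hd2 h),
      ← pvA1]

theorem pvDropWhile_head_false {p : Char → Bool} :
    ∀ (cs : List Char) (d : Char) (rest : List Char),
      cs.dropWhile p = d :: rest → p d = false := by
  intro cs
  induction cs with
  | nil => intro d rest h; simp [List.dropWhile] at h
  | cons c cs ih =>
    intro d rest h
    by_cases hc : p c
    · rw [List.dropWhile_cons_of_pos hc] at h; exact ih d rest h
    · rw [List.dropWhile_cons_of_neg hc] at h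
      cases h; simpa using hc

theorem pvMain (n : Nat) : ∀ cs : List Char, cs.length ≤ n → pvA1 cs = pvGaux [] cs := by
  induction n with
  | zero =>
    intro cs hlen
    have : cs = [] := List.length_eq_zero_iff.mp (Nat.le_zero.mp hlen)
    subst this
    rw [pvA1_pure [] (by simp), gaux_nodelim [] [] (by simp)]
    rfl
  | succ n ih =>
    intro cs hlen
    have hdec := (List.takeWhile_append_dropWhile (p := fun c => !pvDelim c) (l := cs)).symm
    have htake : ∀ c ∈ cs.takeWhile (fun c => !pvDelim c), pvDelim c = false := by
      intro c hc
      have := List.mem_takeWhile_imp hc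
      simpa using this
    cases hdw : cs.dropWhile (fun c => !pvDelim c) with
    | nil =>
      have hfree : ∀ c ∈ cs, pvDelim c = false := by
        intro c hc
        rw [hdec, hdw, List.append_nil] at hc
        exact htake c hc
      rw [pvA1_pure cs hfree, gaux_nodelim cs [] hfree, List.nil_append]
    | cons d rest =>
      have hd : pvDelim d = true := by
        have := pvDropWhile_head_false cs d rest hdw
        simpa using this
      have hlen' : rest.length ≤ n := by
        have h1 : cs.length = (cs.takeWhile (fun c => !pvDelim c)).length + rest.length + 1 := by
          conv_lhs => rw [hdec, hdw]
          simp [List.length_append, Nat.add_assoc]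
        omega
      calc pvA1 cs = pvA1 (cs.takeWhile (fun c => !pvDelim c) ++ d :: rest) := by
              rw [← hdw, ← hdec]
        _ = pvCapStrip (cs.takeWhile (fun c => !pvDelim c)) ++ [d, ' '] ++ pvA1 rest :=
              pvA1_first _ d rest htake hd
        _ = pvGaux [] cs := by
              rw [ih rest hlen']
              have hg := gaux_split (cs.takeWhile (fun c => !pvDelim c)) d rest [] htake hd
              rw [List.nil_append] at hg
              rw [← hg, ← hdw, ← hdec]

-- ===== VERDICT (by name: the statement is the Claim_ definition above) =====
theorem capital_text_spec : Claim_equal_capital_text := by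
  intro s _
  unfold Spec_capital_text capital_text capital_text_alt
  have h1 : PySem.Chars.join ['.', ' '] ((PySem.Chars.splitOn s.toList ['.']).map pvInnerB)
      = pvA1 s.toList := by simp [pvA1, splitOn_eq_mySplit]
  rw [h1, pvMain s.toList.length s.toList le_rfl]
  have h2 := foldl_eq_gaux s.toList [] []
  simp only [List.nil_append] at h2
  simp [← h2]
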